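-- pv_equiv track=rewrite | github.com/HPI-Information-Systems/ExtracTable | table-extraction/table_extractor/transformers/LayoutDelimiterDetection.py | blocks_to_split_indexes
-- ===== SOURCE A (Python) =====
-- from typing import List, Dict
--
-- def blocks_to_split_indexes(blocks: List[Dict[str, any]], width: int) -> List[Dict[str, any]]:
--     block_indexes = [block['indexes'] for block in blocks]  # project
--     flattened_block_indexes = [index for indexes in block_indexes for index in indexes]  # flatten
--     content = sorted(set(range(width)) - set(flattened_block_indexes))  # difference
--     content_blocks = vertical_lines_to_blocks(content, width)
--     return [
--         create_split_index(block['indexes'][0], block['indexes'][-1] + 1)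
--         for block in content_blocks
--     ]
--
-- def create_split_index(start: int, end: int) -> Dict[str, int]:
--     # [start;end[
--     return {
--         'start': start,
--         'end': end,
--         'width': end-start
--     }
--
-- def vertical_lines_to_blocks(vertical_lines: List[int], width: int) -> List[Dict[str, any]]:
--     # detect blocks and assign vertical lines belonging to them
--     blocks = []
--     indexes = []
--     for i_line, vertical_line in enumerate(vertical_lines):
--         if not i_line or vertical_line - indexes[-1] == 1:
--             indexes.append(vertical_line)
--         else:
--             blocks.append(create_block(indexes, width))
--             indexes = [vertical_line]
--     if any(indexes):
--         blocks.append(create_block(indexes, width))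
--     return blocks
--
-- def create_block(indexes: List[int], width: int) -> Dict[str, any]:
--     is_trailing = indexes[0] == 0 or indexes[-1] == width - 1
--     return {
--         'indexes': indexes,
--         'isEssential': not is_trailing and len(indexes) > 1,
--         'isTrailing': is_trailing,
--     }
-- ===== SOURCE B (Python) =====
-- def blocks_to_split_indexes(blocks, width):
--     occupied = set()
--     for block in blocks:
--         occupied.update(block['indexes'])
--     result = []
--     start = None
--     for i in range(width):
--         if i in occupied:
--             if start is not None:
--                 result.append({'start': start, 'end': i, 'width': i - start})
--                 start = None
--         elif start is None:
--             start = i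
--     if start is not None:
--         result.append({'start': start, 'end': width, 'width': width - start})
--     return result
-- ===== Notes on version B (the rewrite author's own statement) =====
-- stated objective: simpler
-- what changed: Replaces the four-stage pipeline (project, flatten, sorted set-difference, run-grouping with enumerate, then re-projection to split dicts) by one occupancy set and a single left-to-right scan over range(width) that emits each gap run directly, dropping the unused isEssential/isTrailing computation.
-- intended difference: When width >= 1, column 0 is free and every column 1..width-1 is occupied, A's any(indexes) guard silently drops that last run and returns [], while B returns the one split {'start':0,'end':1,'width':1}, which is the intended gap at column 0. — e.g. on blocks_to_split_indexes([[("indexes", [1])]], 2): A returns [], B returns [[("start", 0), ("end", 1), ("width", 1)]]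
import Mathlib
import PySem

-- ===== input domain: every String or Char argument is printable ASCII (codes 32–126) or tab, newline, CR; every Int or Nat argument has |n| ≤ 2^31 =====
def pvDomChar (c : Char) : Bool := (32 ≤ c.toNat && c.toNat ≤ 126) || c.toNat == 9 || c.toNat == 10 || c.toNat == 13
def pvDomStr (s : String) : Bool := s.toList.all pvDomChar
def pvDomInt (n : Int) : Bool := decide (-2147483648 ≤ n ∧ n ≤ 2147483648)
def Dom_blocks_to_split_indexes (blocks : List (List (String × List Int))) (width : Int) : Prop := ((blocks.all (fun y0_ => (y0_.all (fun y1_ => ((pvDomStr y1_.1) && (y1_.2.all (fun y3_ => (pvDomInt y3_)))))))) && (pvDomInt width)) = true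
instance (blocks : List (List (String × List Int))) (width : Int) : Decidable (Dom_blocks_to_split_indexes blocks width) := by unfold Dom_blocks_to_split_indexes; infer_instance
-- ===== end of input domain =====

-- B replaces A's four-stage pipeline (project / flatten / sorted set-difference / run-grouping)
-- by one occupancy set and a single scan over range(width) that emits each gap run directly;
-- on the corner stated at D_ below A drops the last run and B keeps it (intended difference).

-- ===== PORT A =====
def create_split_index (start stop : Int) : List (String × Int) :=
  [("start", start), ("end", stop), ("width", stop - start)]

structure PVBlock where
  indexes : List Int
  isEssential : Bool
  isTrailing : Bool
deriving DecidableEq, Repr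

-- indexes[0] / indexes[-1]: create_block is only reached with nonempty indexes, so the .getD 0
-- default is unreachable (Python would raise IndexError on [], which never happens here)
def create_block (indexes : List Int) (width : Int) : PVBlock :=
  let is_trailing : Bool :=
    ((PySem.List.pyGet? indexes 0).getD 0 == 0) || ((PySem.List.pyGet? indexes (-1)).getD 0 == width - 1)
  { indexes := indexes,
    isEssential := !is_trailing && decide (1 < indexes.length),
    isTrailing := is_trailing }

def vlb_step (width : Int) (st : List PVBlock × List Int) (p : Int × Int) : List PVBlock × List Int :=
  if p.1 == 0 || ((p.2 - (PySem.List.pyGet? st.2 (-1)).getD 0) == 1) then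
    (st.1, st.2 ++ [p.2])
  else
    (st.1 ++ [create_block st.2 width], [p.2])

def vertical_lines_to_blocks (vertical_lines : List Int) (width : Int) : List PVBlock :=
  let st := (PySem.List.enumerate vertical_lines).foldl (vlb_step width) ([], [])
  if st.2.any (fun x => x != 0) then st.1 ++ [create_block st.2 width] else st.1

def blocks_to_split_indexes (blocks : List (List (String × List Int))) (width : Int) : List (List (String × Int)) :=
  -- block['indexes']: KeyError on a missing 'indexes' key is excluded by Pre_, so .getD [] is unreachable
  let block_indexes := blocks.map (fun block => (PySem.Dict.get? ⟨block⟩ "indexes").getD [])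
  let flattened_block_indexes := block_indexes.flatMap (fun indexes => indexes)
  let content := PySem.List.sorted
    (PySem.Set.diff (PySem.Set.ofList (PySem.List.pyRange 0 width)) (PySem.Set.ofList flattened_block_indexes))
    (fun x => x)
  let content_blocks := vertical_lines_to_blocks content width
  content_blocks.map (fun block =>
    create_split_index ((PySem.List.pyGet? block.indexes 0).getD 0)
                       ((PySem.List.pyGet? block.indexes (-1)).getD 0 + 1))

-- ===== PORT B =====
def alt_step (occupied : PySem.Set Int) (st : List (List (String × Int)) × Option Int) (i : Int) :
    List (List (String × Int)) × Option Int :=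
  if PySem.Set.contains occupied i then
    match st.2 with
    | some s => (st.1 ++ [[("start", s), ("end", i), ("width", i - s)]], none)
    | none => st
  else
    match st.2 with
    | none => (st.1, some i)
    | some _ => st

def blocks_to_split_indexes_alt (blocks : List (List (String × List Int))) (width : Int) : List (List (String × Int)) :=
  let occupied := blocks.foldl
    (fun s block => PySem.Set.update s ((PySem.Dict.get? ⟨block⟩ "indexes").getD [])) PySem.Set.empty
  let st := (PySem.List.pyRange 0 width).foldl (alt_step occupied) ([], none)
  match st.2 with
  | some s => st.1 ++ [[("start", s), ("end", width), ("width", width - s)]]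
  | none => st.1

-- ===== PRECONDITION & SPEC =====
-- Pre_ excludes exactly the blocks without an 'indexes' key, on which Python A raises KeyError.
def Pre_blocks_to_split_indexes (blocks : List (List (String × List Int))) (width : Int) : Prop :=
  ∀ block ∈ blocks, (PySem.Dict.get? (⟨block⟩ : PySem.Dict String (List Int)) "indexes").isSome = true
instance (blocks : List (List (String × List Int))) (width : Int) : Decidable (Pre_blocks_to_split_indexes blocks width) := by unfold Pre_blocks_to_split_indexes; infer_instance
def pvWitness_blocks_to_split_indexes : (List (List (String × List Int))) × Int :=
  ([[("indexes", [1, 2])], [("indexes", [5])]], 7)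

-- When width ≥ 1, column 0 is free and every column 1..width-1 is occupied, A's any(indexes)
-- guard silently drops that last (and only) gap run and returns [], while B returns the one split
-- {'start': 0, 'end': 1, 'width': 1}, the intended gap at column 0.
def D_blocks_to_split_indexes (blocks : List (List (String × List Int))) (width : Int) : Prop :=
  let occ := blocks.flatMap (fun b => (PySem.Dict.get? (⟨b⟩ : PySem.Dict String (List Int)) "indexes").getD [])
  1 ≤ width ∧ ¬(0:Int) ∈ occ ∧ ((occ.filter (fun i => decide (1 ≤ i) && decide (i < width))).dedup.length : Int) = width - 1
instance (blocks : List (List (String × List Int))) (width : Int) : Decidable (D_blocks_to_split_indexes blocks width) := by unfold D_blocks_to_split_indexes; infer_instance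

def Spec_blocks_to_split_indexes (blocks : List (List (String × List Int))) (width : Int) (out : List (List (String × Int))) : Prop := ¬ D_blocks_to_split_indexes blocks width → out = blocks_to_split_indexes_alt blocks width
instance (blocks : List (List (String × List Int))) (width : Int) (out : List (List (String × Int))) : Decidable (Spec_blocks_to_split_indexes blocks width out) := by unfold Spec_blocks_to_split_indexes; infer_instance

def pvDiffWitness_blocks_to_split_indexes : (List (List (String × List Int))) × Int :=
  ([[("indexes", [1])]], 2)
def pvDiffWitnessOut_blocks_to_split_indexes : (List (List (String × Int))) × (List (List (String × Int))) :=
  ([], [[("start", 0), ("end", 1), ("width", 1)]])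

-- ===== CLAIM =====
def Claim_unchanged_blocks_to_split_indexes : Prop := ∀ (blocks : List (List (String × List Int))) (width : Int), Dom_blocks_to_split_indexes blocks width → Pre_blocks_to_split_indexes blocks width → Spec_blocks_to_split_indexes blocks width (blocks_to_split_indexes blocks width)
def Claim_changed_blocks_to_split_indexes : Prop := Dom_blocks_to_split_indexes (pvDiffWitness_blocks_to_split_indexes.1) (pvDiffWitness_blocks_to_split_indexes.2) ∧ Pre_blocks_to_split_indexes (pvDiffWitness_blocks_to_split_indexes.1) (pvDiffWitness_blocks_to_split_indexes.2) ∧ D_blocks_to_split_indexes (pvDiffWitness_blocks_to_split_indexes.1) (pvDiffWitness_blocks_to_split_indexes.2) ∧ blocks_to_split_indexes (pvDiffWitness_blocks_to_split_indexes.1) (pvDiffWitness_blocks_to_split_indexes.2) = pvDiffWitnessOut_blocks_to_split_indexes.1 ∧ blocks_to_split_indexes_alt (pvDiffWitness_blocks_to_split_indexes.1) (pvDiffWitness_blocks_to_split_indexes.2) = pvDiffWitnessOut_blocks_to_split_indexes.2 ∧ pvDiffWitnessOut_blocks_to_split_indexes.1 ≠ pvDiffWitnessOut_blocks_to_split_i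ndexes.2
def Claim_exact_blocks_to_split_indexes : Prop := ∀ (blocks : List (List (String × List Int))) (width : Int), Dom_blocks_to_split_indexes blocks width → Pre_blocks_to_split_indexes blocks width → D_blocks_to_split_indexes blocks width → blocks_to_split_indexes blocks width ≠ blocks_to_split_indexes_alt blocks width

-- ===== LEMMAS AND PROOFS =====

lemma pyRange_nonpos {a b : Int} (h : b ≤ a) : PySem.List.pyRange a b = [] := by
  simp only [PySem.List.pyRange]
  norm_num
  intro h2; omega

lemma pyGet?_cons_zero {α : Type} (x : α) (xs : List α) : PySem.List.pyGet? (x :: xs) 0 = some x := by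
  simp [PySem.List.pyGet?, PySem.List.pyIdx?]

lemma pyGet?_append_neg_one {α : Type} (xs : List α) (x : α) :
    PySem.List.pyGet? (xs ++ [x]) (-1) = some x := by
  simp [PySem.List.pyGet?, PySem.List.pyIdx?]

lemma pyRange_singleton (a : Int) : PySem.List.pyRange a (a + 1) = [a] := by
  rw [PySem.List.pyRange_one_succ_right le_rfl, pyRange_nonpos le_rfl]; rfl

lemma pyGet?_pyRange_zero {a b : Int} (h : a < b) : PySem.List.pyGet? (PySem.List.pyRange a b) 0 = some a := by
  rw [PySem.List.pyRange_one_cons h, pyGet?_cons_zero]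

lemma pyGet?_pyRange_neg_one {a b : Int} (h : a < b) :
    PySem.List.pyGet? (PySem.List.pyRange a b) (-1) = some (b - 1) := by
  have : b = (b - 1) + 1 := by ring
  rw [this, PySem.List.pyRange_one_succ_right (by omega), pyGet?_append_neg_one]
  ring_nf

lemma enumerate_append_singleton {α : Type} (xs : List α) (x : α) (s : Int) :
    PySem.List.enumerate (xs ++ [x]) s = PySem.List.enumerate xs s ++ [(s + xs.length, x)] := by
  induction xs generalizing s with
  | nil => simp [PySem.List.enumerate]
  | cons y ys ih => simp [PySem.List.enumerate, ih]; omega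

def pvRuns (occ : Int → Bool) : Nat → List (Int × Int)
  | 0 => []
  | n + 1 =>
    if occ n then pvRuns occ n
    else match pvRuns occ n with
      | [] => [((n : Int), (n : Int) + 1)]
      | p :: r => if p.2 = (n : Int) then (p.1, (n : Int) + 1) :: r else ((n : Int), (n : Int) + 1) :: p :: r

lemma pvRuns_congr {occ1 occ2 : Int → Bool} (h : ∀ i : Int, occ1 i = occ2 i) (n : Nat) :
    pvRuns occ1 n = pvRuns occ2 n := by
  induction n with
  | zero => rfl
  | succ n ih => simp only [pvRuns, h, ih]

lemma pvRuns_inv (occ : Int → Bool) (n : Nat) :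
    (∀ p ∈ pvRuns occ n, 0 ≤ p.1 ∧ p.1 < p.2 ∧ p.2 ≤ (n : Int)) ∧
      (pvRuns occ n).Pairwise (fun p q => q.2 < p.1) := by
  induction n with
  | zero => simp [pvRuns]
  | succ n ih =>
    obtain ⟨hb, hp⟩ := ih
    simp only [pvRuns]
    by_cases ho : occ n
    · simp only [ho, if_true]
      exact ⟨fun p hpm => by have := hb p hpm; push_cast; omega, hp⟩
    · simp only [ho, if_false, Bool.false_eq_true]
      rcases heq : pvRuns occ n with _ | ⟨p, r⟩ <;> rw [heq] at hb hp
      · constructor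
        · intro q hq; simp at hq; subst hq; push_cast; omega
        · simp
      · by_cases he : p.2 = (n : Int)
        · simp only [he, if_true]
          constructor
          · intro q hq
            simp at hq
            rcases hq with rfl | hq
            · have := hb p (by simp); push_cast; simp; omega
            · have := hb q (by simp [hq]); push_cast; omega
          · rw [List.pairwise_cons] at hp ⊢
            exact ⟨fun q hq => by have := hp.1 q hq; simp; omega, hp.2⟩
        · simp only [he, if_false]
          constructor
          · intro q hq
            simp at hq
            rcases hq with rfl | rfl | hq
            · push_cast; omega
            · have := hb q (by simp); push_cast; omega
            · have := hb q (by simp [hq]); push_cast; omega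
          · rw [List.pairwise_cons]
            constructor
            · intro q hq
              simp at hq
              rcases hq with rfl | hq
              · have := hb q (by simp); simp; omega
              · have hq2 := hb q (by simp [hq])
                rw [List.pairwise_cons] at hp
                have := hp.1 q hq
                have := hb p (by simp)
                simp; omega
            · exact hp

lemma pvRuns_cover (occ : Int → Bool) (n : Nat) :
    ∀ i : Int, (∃ p ∈ pvRuns occ n, p.1 ≤ i ∧ i < p.2) ↔ (0 ≤ i ∧ i < (n : Int) ∧ occ i = false) := by
  induction n with
  | zero => intro i; simp [pvRuns]; omega
  | succ n ih =>
    intro i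
    have hb := (pvRuns_inv occ n).1
    simp only [pvRuns]
    by_cases ho : occ n
    · simp only [ho, if_true]
      rw [ih]
      push_cast
      constructor
      · rintro ⟨h1, h2, h3⟩; exact ⟨h1, by omega, h3⟩
      · rintro ⟨h1, h2, h3⟩
        refine ⟨h1, ?_, h3⟩
        rcases lt_or_eq_of_le (Int.lt_add_one_iff.mp h2) with h | h
        · exact h
        · exfalso; rw [← h] at ho; rw [h3] at ho; simp at ho
    · simp only [ho, if_false, Bool.false_eq_true]
      rcases heq : pvRuns occ n with _ | ⟨p, r⟩ <;> rw [heq] at ih hb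
      · simp only [List.mem_singleton]
        have hemp : ∀ j : Int, ¬(0 ≤ j ∧ j < (n : Int) ∧ occ j = false) := by
          intro j hj; exact absurd ((ih j).mpr hj) (by simp)
        constructor
        · rintro ⟨q, rfl, h1, h2⟩
          push_cast at h1 h2 ⊢
          have hi : i = (n : Int) := by omega
          subst hi
          refine ⟨by omega, by omega, by simp [ho]⟩
        · rintro ⟨h1, h2, h3⟩
          have hni : ¬ i < (n : Int) := fun hlt => hemp i ⟨h1, hlt, h3⟩
          have hi : i = (n : Int) := by push_cast at h2 ⊢; omega
          subst hi
          exact ⟨_, rfl, by push_cast; omega⟩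
      · by_cases he : p.2 = (n : Int)
        · simp only [he, if_true]
          constructor
          · rintro ⟨q, hq, h1, h2⟩
            simp at hq
            rcases hq with rfl | hq
            · simp at h1 h2
              by_cases hin : i < (n : Int)
              · obtain ⟨c1, c2, c3⟩ := (ih i).mp ⟨p, by simp, h1, by omega⟩
                exact ⟨c1, by push_cast; omega, c3⟩
              · have hi : i = (n : Int) := by push_cast at h2; omega
                subst hi
                refine ⟨by have := hb p (by simp); omega, by push_cast; omega, by simp [ho]⟩
            · obtain ⟨c1, c2, c3⟩ := (ih i).mp ⟨q, by simp [hq], h1, h2⟩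
              exact ⟨c1, by push_cast; omega, c3⟩
          · rintro ⟨h1, h2, h3⟩
            by_cases hin : i < (n : Int)
            · obtain ⟨q, hq, hq1, hq2⟩ := (ih i).mpr ⟨h1, hin, h3⟩
              simp at hq
              rcases hq with rfl | hq
              · exact ⟨(q.1, (n : Int) + 1), by simp, by simpa using hq1, by simp; omega⟩
              · exact ⟨q, by simp [hq], hq1, hq2⟩
            · have hi : i = (n : Int) := by push_cast at h2; omega
              subst hi
              exact ⟨(p.1, (n : Int) + 1), by simp, by show p.1 ≤ (n:Int); have := hb p (by simp); omega, by simp⟩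
        · simp only [he, if_false]
          constructor
          · rintro ⟨q, hq, h1, h2⟩
            simp at hq
            rcases hq with rfl | rfl | hq
            · simp at h1 h2
              have hi : i = (n : Int) := by omega
              subst hi
              refine ⟨by omega, by push_cast; omega, by simp [ho]⟩
            · obtain ⟨c1, c2, c3⟩ := (ih i).mp ⟨q, by simp, h1, h2⟩
              exact ⟨c1, by push_cast; omega, c3⟩
            · obtain ⟨c1, c2, c3⟩ := (ih i).mp ⟨q, by simp [hq], h1, h2⟩
              exact ⟨c1, by push_cast; omega, c3⟩
          · rintro ⟨h1, h2, h3⟩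
            by_cases hin : i < (n : Int)
            · obtain ⟨q, hq, hq1, hq2⟩ := (ih i).mpr ⟨h1, hin, h3⟩
              exact ⟨q, List.mem_cons_of_mem _ hq, hq1, hq2⟩
            · have hi : i = (n : Int) := by push_cast at h2; omega
              subst hi
              exact ⟨((n : Int), (n : Int) + 1), by simp, le_rfl, by omega⟩

def splitPair (p : Int × Int) : List (String × Int) :=
  [("start", p.1), ("end", p.2), ("width", p.2 - p.1)]

def contentL (occ : Int → Bool) (n : Nat) : List Int :=
  (PySem.List.pyRange 0 (n : Int)).filter (fun i => !occ i)

lemma Astate (w : Int) (occ : Int → Bool) (n : Nat) :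
    ((PySem.List.enumerate (contentL occ n)).foldl (vlb_step w) ([], []) =
      (match pvRuns occ n with
       | [] => (([] : List PVBlock), ([] : List Int))
       | p :: r => (r.reverse.map (fun q => create_block (PySem.List.pyRange q.1 q.2) w),
                    PySem.List.pyRange p.1 p.2))) ∧
      (pvRuns occ n = [] ↔ contentL occ n = []) := by
  induction n with
  | zero =>
    constructor
    · simp [contentL, pyRange_nonpos (le_refl (0:Int)), PySem.List.enumerate, pvRuns]
    · simp [contentL, pyRange_nonpos (le_refl (0:Int)), pvRuns]
  | succ n ih =>
    obtain ⟨ihs, ihe⟩ := ih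
    have hb := (pvRuns_inv occ n).1
    have hcontent : contentL occ (n + 1) = contentL occ n ++ (if occ n then [] else [(n : Int)]) := by
      unfold contentL
      push_cast
      rw [PySem.List.pyRange_one_succ_right (Int.natCast_nonneg n), List.filter_append]
      by_cases ho : occ n <;> simp [ho]
    by_cases ho : occ n
    · rw [hcontent]
      simp only [ho, if_true, List.append_nil]
      simp only [pvRuns, ho, if_true]
      exact ⟨ihs, ihe⟩
    · rw [hcontent]
      simp only [ho, if_false, Bool.false_eq_true]
      rw [enumerate_append_singleton, List.foldl_append]
      simp only [List.foldl_cons, List.foldl_nil]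
      simp only [pvRuns, ho, if_false, Bool.false_eq_true]
      rcases heq : pvRuns occ n with _ | ⟨p, r⟩ <;> rw [heq] at ihs ihe hb
      · have hc : contentL occ n = [] := ihe.mp rfl
        rw [hc] at ihs ⊢
        simp only [List.nil_append]
        constructor
        · rw [ihs]
          simp [vlb_step, pyRange_singleton]
        · simp
      · have hc : contentL occ n ≠ [] := fun h => by simpa using ihe.mpr h
        have hp12 := hb p (by simp)
        rw [ihs]
        have hlen : ¬ ((0 : Int) + (contentL occ n).length == 0) = true := by
          simpa using hc
        constructor
        · simp only [vlb_step]
          rw [pyGet?_pyRange_neg_one hp12.2.1]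
          by_cases he : p.2 = (n : Int)
          · rw [if_pos]
            · simp only [he, if_true]
              rw [← he, PySem.List.pyRange_one_succ_right (by omega)]
            · simp only [Bool.or_eq_true, hlen]
              simp; omega
          · rw [if_neg]
            · simp only [he, if_false]
              simp [pyRange_singleton]
            · simp only [Bool.or_eq_true]
              push_neg
              refine ⟨by simpa using hlen, by simp; omega⟩
        · constructor
          · intro h
            exfalso
            revert h
            split <;> (try split) <;> simp
          · intro h; exact absurd h (by simp)

lemma Bstate (S : PySem.Set Int) (n : Nat) :
    (PySem.List.pyRange 0 (n : Int)).foldl (alt_step S) ([], none) =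
      (match pvRuns (fun i => PySem.Set.contains S i) n with
       | [] => (([] : List (List (String × Int))), (none : Option Int))
       | p :: r =>
         if p.2 = (n : Int) then (r.reverse.map splitPair, some p.1)
         else ((p :: r).reverse.map splitPair, none)) := by
  induction n with
  | zero => simp [pyRange_nonpos (le_refl (0 : Int)), pvRuns]
  | succ n ih =>
    have hb := (pvRuns_inv (fun i => PySem.Set.contains S i) n).1
    push_cast
    rw [PySem.List.pyRange_one_succ_right (Int.natCast_nonneg n), List.foldl_append]
    simp only [List.foldl_cons, List.foldl_nil]
    rw [ih]
    simp only [pvRuns]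
    by_cases ho : PySem.Set.contains S (n : Int)
    · have hom : ((n : Int)) ∈ S := (PySem.Set.contains_iff S _).mp ho
      simp only [ho, if_true]
      rcases heq : pvRuns (fun i => PySem.Set.contains S i) n with _ | ⟨p, r⟩ <;>
        rw [heq] at hb
      · simp [alt_step, hom]
      · have hp12 := hb p (by simp)
        have hne : ¬ (p.2 = (n : Int) + 1) := by omega
        by_cases he : p.2 = (n : Int)
        · simp [alt_step, hom, he, hne, splitPair]
        · simp [alt_step, hom, he, hne]
    · have hom : ¬ ((n : Int)) ∈ S := fun hm => ho ((PySem.Set.contains_iff S _).mpr hm)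
      simp only [ho, if_false, Bool.false_eq_true]
      rcases heq : pvRuns (fun i => PySem.Set.contains S i) n with _ | ⟨p, r⟩ <;>
        rw [heq] at hb
      · simp [alt_step, hom]
      · have hp12 := hb p (by simp)
        by_cases he : p.2 = (n : Int)
        · simp [alt_step, hom, he]
        · simp [alt_step, hom, he]

def occOf (blocks : List (List (String × List Int))) : Int → Bool :=
  fun i => decide (∃ block ∈ blocks, i ∈ (PySem.Dict.get? (⟨block⟩ : PySem.Dict String (List Int)) "indexes").getD [])

lemma mem_fold_update {α : Type} (g : α → List Int) (l : List α) (s : PySem.Set Int) (x : Int) :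
    x ∈ l.foldl (fun s b => PySem.Set.update s (g b)) s ↔ x ∈ s ∨ ∃ b ∈ l, x ∈ g b := by
  induction l generalizing s with
  | nil => simp
  | cons b t ih => rw [List.foldl_cons, ih, PySem.Set.mem_update]; simp; tauto

lemma flat_mem (blocks : List (List (String × List Int))) (i : Int) :
    i ∈ (blocks.map (fun block => (PySem.Dict.get? (⟨block⟩ : PySem.Dict String (List Int)) "indexes").getD [])).flatMap (fun ixs => ixs) ↔
      ∃ block ∈ blocks, i ∈ (PySem.Dict.get? (⟨block⟩ : PySem.Dict String (List Int)) "indexes").getD [] := by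
  simp [List.mem_flatMap]

lemma any_pyRange_zero {s e : Int} (h : s < e) :
    ((PySem.List.pyRange s e).any (fun x => x != 0) = false) ↔ (s = 0 ∧ e = 1) := by
  constructor
  · intro ha
    have hall : ∀ x ∈ PySem.List.pyRange s e, x = 0 := by
      intro x hx
      have := List.any_eq_false.mp ha x hx
      simpa using this
    have hs : s = 0 := hall s (PySem.List.mem_pyRange_one.mpr ⟨le_rfl, h⟩)
    have he : e - 1 = 0 := hall (e - 1) (PySem.List.mem_pyRange_one.mpr ⟨by omega, by omega⟩)
    omega
  · rintro ⟨rfl, rfl⟩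
    decide

lemma map_create_block (w s e : Int) (h : s < e) :
    create_split_index ((PySem.List.pyGet? (create_block (PySem.List.pyRange s e) w).indexes 0).getD 0)
        ((PySem.List.pyGet? (create_block (PySem.List.pyRange s e) w).indexes (-1)).getD 0 + 1) =
      splitPair (s, e) := by
  simp only [create_block]
  rw [pyGet?_pyRange_zero h, pyGet?_pyRange_neg_one h]
  simp only [create_split_index, splitPair, Option.getD_some]
  have h1 : e - 1 + 1 = e := by ring
  rw [h1]

lemma A_char (blocks : List (List (String × List Int))) (n : Nat) :
    blocks_to_split_indexes blocks (n : Int) =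
      (match pvRuns (occOf blocks) n with
       | [] => []
       | p :: r => if p = ((0 : Int), (1 : Int)) then r.reverse.map splitPair
                   else (p :: r).reverse.map splitPair) := by
  unfold blocks_to_split_indexes
  dsimp only
  have hcontent :
      PySem.List.sorted
        (PySem.Set.diff (PySem.Set.ofList (PySem.List.pyRange 0 (n : Int)))
          (PySem.Set.ofList ((blocks.map (fun block => (PySem.Dict.get? (⟨block⟩ : PySem.Dict String (List Int)) "indexes").getD [])).flatMap (fun ixs => ixs))))
        (fun x => x) = contentL (occOf blocks) n := by
    rw [PySem.Set.ofList_eq_self_of_nodup _ (PySem.List.nodup_pyRange_one 0 (n : Int))]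
    have hd : ∀ (t : PySem.Set Int),
        PySem.Set.diff (PySem.List.pyRange 0 (n : Int)) t =
          (PySem.List.pyRange 0 (n : Int)).filter (fun x => !t.contains x) := fun _ => rfl
    rw [hd]
    have hfil :
        (PySem.List.pyRange 0 (n : Int)).filter
            (fun x => !(PySem.Set.ofList ((blocks.map (fun block => (PySem.Dict.get? (⟨block⟩ : PySem.Dict String (List Int)) "indexes").getD [])).flatMap (fun ixs => ixs))).contains x) =
          contentL (occOf blocks) n := by
      unfold contentL
      apply List.filter_congr
      intro i _
      congr 1
      by_cases hm : i ∈ (blocks.map (fun block => (PySem.Dict.get? (⟨block⟩ : PySem.Dict String (List Int)) "indexes").getD [])).flatMap (fun ixs => ixs)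
      · have h1 := (PySem.Set.contains_iff _ i).mpr ((PySem.Set.mem_ofList _ _).mpr hm)
        have h2 : occOf blocks i = true := decide_eq_true ((flat_mem blocks i).mp hm)
        rw [h1, h2]
      · have h1 : PySem.Set.contains (PySem.Set.ofList ((blocks.map (fun block => (PySem.Dict.get? (⟨block⟩ : PySem.Dict String (List Int)) "indexes").getD [])).flatMap (fun ixs => ixs))) i = false := by
          rw [Bool.eq_false_iff]
          intro hc
          exact hm ((PySem.Set.mem_ofList _ _).mp ((PySem.Set.contains_iff _ _).mp hc))
        have h2 : occOf blocks i = false := by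
          rw [Bool.eq_false_iff]
          intro hc
          exact hm ((flat_mem blocks i).mpr (of_decide_eq_true hc)) |>.elim
        rw [h1, h2]
    rw [hfil]
    apply PySem.List.sorted_eq_self_of_pairwise
    exact (List.Pairwise.sublist List.filter_sublist
      (PySem.List.pairwise_lt_pyRange_one 0 (n : Int))).imp (fun h => le_of_lt h)
  rw [hcontent]
  unfold vertical_lines_to_blocks
  have hb := (pvRuns_inv (occOf blocks) n).1
  rw [(Astate (n : Int) (occOf blocks) n).1]
  rcases heq : pvRuns (occOf blocks) n with _ | ⟨p, r⟩ <;> rw [heq] at hb <;> dsimp only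
  · rfl
  · have hp12 := hb p (by simp)
    have hmap :
        (r.reverse.map (fun q => create_block (PySem.List.pyRange q.1 q.2) (n : Int))).map
            (fun block => create_split_index ((PySem.List.pyGet? block.indexes 0).getD 0)
              ((PySem.List.pyGet? block.indexes (-1)).getD 0 + 1)) =
          r.reverse.map splitPair := by
      rw [List.map_map]
      apply List.map_congr_left
      intro q hq
      have hq12 := hb q (List.mem_cons_of_mem _ (List.mem_reverse.mp hq))
      have := map_create_block (n : Int) q.1 q.2 hq12.2.1
      simpa using this
    by_cases hp : p = ((0 : Int), (1 : Int))
    · rw [if_pos hp, hp]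
      have hany : ((PySem.List.pyRange (0 : Int) 1).any (fun x => x != 0)) = false := by decide
      rw [hany]
      simpa using hmap
    · rw [if_neg hp]
      have hany : ((PySem.List.pyRange p.1 p.2).any (fun x => x != 0)) = true := by
        rw [← Bool.not_eq_false]
        intro hf
        obtain ⟨h1, h2⟩ := (any_pyRange_zero hp12.2.1).mp hf
        exact hp (Prod.ext_iff.mpr ⟨h1, h2⟩)
      rw [hany]
      simp only [if_true, List.map_append, hmap, List.reverse_cons]
      have := map_create_block (n : Int) p.1 p.2 hp12.2.1
      simpa using this

lemma B_char (blocks : List (List (String × List Int))) (n : Nat) :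
    blocks_to_split_indexes_alt blocks (n : Int) = (pvRuns (occOf blocks) n).reverse.map splitPair := by
  unfold blocks_to_split_indexes_alt
  dsimp only
  have hocc : ∀ i : Int,
      PySem.Set.contains
        (blocks.foldl (fun s block => PySem.Set.update s ((PySem.Dict.get? (⟨block⟩ : PySem.Dict String (List Int)) "indexes").getD [])) PySem.Set.empty) i =
      occOf blocks i := by
    intro i
    rcases ho : occOf blocks i with _ | _
    · rw [Bool.eq_false_iff]
      intro hc
      have hm := (PySem.Set.contains_iff _ _).mp hc
      rw [mem_fold_update] at hm
      have hm2 : ∃ b ∈ blocks, i ∈ (PySem.Dict.get? (⟨b⟩ : PySem.Dict String (List Int)) "indexes").getD [] := by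
        rcases hm with hm | hm
        · exact absurd hm (by simp [PySem.Set.empty])
        · exact hm
      have hT : occOf blocks i = true := decide_eq_true hm2
      rw [ho] at hT
      exact Bool.false_ne_true hT
    · apply (PySem.Set.contains_iff _ _).mpr
      rw [mem_fold_update]
      exact Or.inr (of_decide_eq_true ho)
  rw [Bstate]
  rw [pvRuns_congr hocc n]
  have hb := (pvRuns_inv (occOf blocks) n).1
  rcases heq : pvRuns (occOf blocks) n with _ | ⟨p, r⟩ <;> rw [heq] at hb <;> dsimp only
  · rfl
  · have hp12 := hb p (by simp)
    by_cases he : p.2 = (n : Int)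
    · rw [if_pos he]
      dsimp only
      rw [List.reverse_cons, List.map_append]
      simp [splitPair, he]
    · rw [if_neg he]

lemma occOf_iff (blocks : List (List (String × List Int))) (i : Int) :
    occOf blocks i = true ↔
      (∃ block ∈ blocks, i ∈ (PySem.Dict.get? (⟨block⟩ : PySem.Dict String (List Int)) "indexes").getD []) := by
  simp [occOf]

-- proof-side restatement of D_ (pointwise over the columns) and the counting argument linking them
def Dspec (blocks : List (List (String × List Int))) (width : Int) : Prop :=
  1 ≤ width ∧ ∀ i ∈ PySem.List.pyRange 0 width,
    ((∃ block ∈ blocks, i ∈ (PySem.Dict.get? (⟨block⟩ : PySem.Dict String (List Int)) "indexes").getD []) ↔ i ≠ 0)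

lemma full_iff (flat : List Int) (width : Int) (hw : 1 ≤ width) :
    (((flat.filter (fun i => decide (1 ≤ i) && decide (i < width))).dedup.length : Int) = width - 1) ↔
      ∀ i : Int, 1 ≤ i → i < width → i ∈ flat := by
  set L := (flat.filter (fun i => decide (1 ≤ i) && decide (i < width))).dedup with hL
  have hnd : L.Nodup := List.nodup_dedup _
  have hmem : ∀ i : Int, i ∈ L ↔ (i ∈ flat ∧ 1 ≤ i ∧ i < width) := by
    intro i
    rw [hL, List.mem_dedup, List.mem_filter]
    simp
  have hsub : L.toFinset ⊆ Finset.Ico (1 : Int) width := by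
    intro i hi
    rw [List.mem_toFinset, hmem] at hi
    rw [Finset.mem_Ico]
    exact hi.2
  have hcardIco : (Finset.Ico (1 : Int) width).card = (width - 1).toNat := by
    rw [Int.card_Ico]
  have hcardL : L.toFinset.card = L.length := List.toFinset_card_of_nodup hnd
  have hcast : ((L.length : Int) = width - 1) ↔ L.length = (width - 1).toNat := by omega
  rw [hcast]
  constructor
  · intro h i h1 h2
    have heqf : L.toFinset = Finset.Ico (1 : Int) width := by
      apply Finset.eq_of_subset_of_card_le hsub
      rw [hcardIco, hcardL, h]
    have : i ∈ L.toFinset := by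
      rw [heqf, Finset.mem_Ico]
      exact ⟨h1, h2⟩
    exact ((hmem i).mp (List.mem_toFinset.mp this)).1
  · intro h
    have heqf : L.toFinset = Finset.Ico (1 : Int) width := by
      apply Finset.Subset.antisymm hsub
      intro i hi
      rw [Finset.mem_Ico] at hi
      rw [List.mem_toFinset, hmem]
      exact ⟨h i hi.1 hi.2, hi⟩
    rw [← hcardL, heqf, hcardIco]

lemma D_iff (blocks : List (List (String × List Int))) (width : Int) :
    D_blocks_to_split_indexes blocks width ↔ Dspec blocks width := by
  unfold D_blocks_to_split_indexes Dspec
  have hflat : ∀ i : Int,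
      i ∈ blocks.flatMap (fun b => (PySem.Dict.get? (⟨b⟩ : PySem.Dict String (List Int)) "indexes").getD []) ↔
        ∃ block ∈ blocks, i ∈ (PySem.Dict.get? (⟨block⟩ : PySem.Dict String (List Int)) "indexes").getD [] := by
    intro i
    simp [List.mem_flatMap]
  constructor
  · rintro ⟨hw, h0, hcnt⟩
    refine ⟨hw, ?_⟩
    intro i hi
    obtain ⟨hi0, hiw⟩ := PySem.List.mem_pyRange_one.mp hi
    constructor
    · intro hex hiz
      subst hiz
      exact h0 ((hflat 0).mpr hex)
    · intro hne
      exact (hflat i).mp ((full_iff _ width hw).mp hcnt i (by omega) hiw)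
  · rintro ⟨hw, hiff⟩
    refine ⟨hw, ?_, ?_⟩
    · intro hex
      exact (hiff 0 (PySem.List.mem_pyRange_one.mpr ⟨le_rfl, by omega⟩)).mp ((hflat 0).mp hex) rfl
    · rw [full_iff _ width hw]
      intro i h1 h2
      rw [hflat i]
      exact (hiff i (PySem.List.mem_pyRange_one.mpr ⟨by omega, h2⟩)).mpr (by omega)

lemma runs_head01 (blocks : List (List (String × List Int))) (n : Nat) (r : List (Int × Int))
    (h : pvRuns (occOf blocks) n = ((0 : Int), (1 : Int)) :: r) :
    r = [] ∧ Dspec blocks (n : Int) := by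
  obtain ⟨hb, hp⟩ := pvRuns_inv (occOf blocks) n
  rw [h] at hb hp
  have hr : r = [] := by
    rcases r with _ | ⟨q, r'⟩
    · rfl
    · exfalso
      have h1 := hb q (by simp)
      have h2 := (List.pairwise_cons.mp hp).1 q (by simp)
      simp at h1 h2
      omega
  subst hr
  refine ⟨rfl, ?_, ?_⟩
  · have := (hb ((0 : Int), (1 : Int)) (by simp)).2.2
    simpa using this
  · intro i hi
    obtain ⟨hi0, hin⟩ := PySem.List.mem_pyRange_one.mp hi
    have hcov := pvRuns_cover (occOf blocks) n i
    rw [h] at hcov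
    rw [← occOf_iff]
    constructor
    · intro hT hiz
      subst hiz
      have hcov0 := pvRuns_cover (occOf blocks) n 0
      rw [h] at hcov0
      have := hcov0.mp ⟨((0 : Int), (1 : Int)), by simp, le_rfl, by norm_num⟩
      rw [this.2.2] at hT
      exact Bool.false_ne_true hT
    · intro hne
      rcases hT : occOf blocks i with _ | _
      · exfalso
        have := hcov.mpr ⟨hi0, hin, hT⟩
        obtain ⟨q, hq, hq1, hq2⟩ := this
        simp at hq
        subst hq
        simp at hq1 hq2
        omega
      · rfl

lemma D_runs (blocks : List (List (String × List Int))) (n : Nat)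
    (hD : Dspec blocks (n : Int)) :
    pvRuns (occOf blocks) n = [((0 : Int), (1 : Int))] := by
  obtain ⟨hw, hiff⟩ := hD
  obtain ⟨hb, hp⟩ := pvRuns_inv (occOf blocks) n
  have hocc : ∀ i : Int, 0 ≤ i → i < (n : Int) → (occOf blocks i = false ↔ i = 0) := by
    intro i h0 hn
    have := hiff i (PySem.List.mem_pyRange_one.mpr ⟨h0, hn⟩)
    rw [← occOf_iff] at this
    constructor
    · intro hF
      by_contra hne
      have hT2 := this.mpr hne
      rw [hF] at hT2
      exact Bool.false_ne_true hT2
    · intro hz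
      rcases hT : occOf blocks i with _ | _
      · rfl
      · exact absurd (this.mp hT) (by simp [hz])
  have hall : ∀ q ∈ pvRuns (occOf blocks) n, q = ((0 : Int), (1 : Int)) := by
    intro q hq
    have hq12 := hb q hq
    have hc1 := (pvRuns_cover (occOf blocks) n q.1).mp ⟨q, hq, le_rfl, hq12.2.1⟩
    have hc2 := (pvRuns_cover (occOf blocks) n (q.2 - 1)).mp ⟨q, hq, by omega, by omega⟩
    have e1 : q.1 = 0 := (hocc q.1 hc1.1 hc1.2.1).mp hc1.2.2
    have e2 : q.2 - 1 = 0 := (hocc (q.2 - 1) hc2.1 hc2.2.1).mp hc2.2.2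
    exact Prod.ext_iff.mpr ⟨e1, by omega⟩
  have hne := (pvRuns_cover (occOf blocks) n 0).mpr
    ⟨le_rfl, by omega, (hocc 0 le_rfl (by omega)).mpr rfl⟩
  rcases heq : pvRuns (occOf blocks) n with _ | ⟨q, r⟩
  · rw [heq] at hne; simp at hne
  · rw [heq] at hall hp
    have hq0 := hall q (by simp)
    rcases r with _ | ⟨q', r'⟩
    · rw [hq0]
    · exfalso
      have hq'0 := hall q' (by simp)
      have := (List.pairwise_cons.mp hp).1 q' (by simp)
      rw [hq0, hq'0] at this
      norm_num at this

lemma neg_width (blocks : List (List (String × List Int))) (width : Int) (hw : width < 0) :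
    blocks_to_split_indexes blocks width = [] ∧ blocks_to_split_indexes_alt blocks width = [] := by
  have hr : PySem.List.pyRange 0 width = [] := pyRange_nonpos (by omega)
  constructor
  · unfold blocks_to_split_indexes vertical_lines_to_blocks
    dsimp only
    rw [hr]
    simp [PySem.Set.diff, PySem.List.sorted, PySem.List.enumerate]
  · unfold blocks_to_split_indexes_alt
    dsimp only
    rw [hr]
    rfl

-- ===== VERDICT =====
theorem blocks_to_split_indexes_spec : Claim_unchanged_blocks_to_split_indexes := by
  intro blocks width hdom hpre hnd
  by_cases hw : 0 ≤ width
  · lift width to Nat using hw with n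
    rw [A_char, B_char]
    rcases heq : pvRuns (occOf blocks) n with _ | ⟨p, r⟩ <;> dsimp only
    · rfl
    · by_cases hp : p = ((0 : Int), (1 : Int))
      · exfalso
        rw [hp] at heq
        exact hnd ((D_iff blocks (n : Int)).mpr (runs_head01 blocks n r heq).2)
      · rw [if_neg hp]
  · have h := neg_width blocks width (by omega)
    rw [h.1, h.2]

theorem blocks_to_split_indexes_changed : Claim_changed_blocks_to_split_indexes := by
  unfold Claim_changed_blocks_to_split_indexes; decide

theorem blocks_to_split_indexes_tight : Claim_exact_blocks_to_split_indexes := by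
  intro blocks width hdom hpre hD
  have hw : 0 ≤ width := le_trans (by norm_num) hD.1
  lift width to Nat using hw with n
  rw [A_char, B_char, D_runs blocks n ((D_iff blocks (n : Int)).mp hD)]
  simp [splitPair]
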